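-- pv_equiv track=rewrite | github.com/timcypresswong/littletools | create_RAG_db.py | fuse_chunk_to_larger_content
-- ===== SOURCE A (Python) =====
-- from typing import List
--
-- def fuse_chunk_to_larger_content(chunks: List[str]) -> List[str]:
--     ContentList = []
--     for i, chunk in enumerate(chunks):
--         if chunk.find("#") != -1:
--             content = chunk
--             for j in range(i + 1, len(chunks)):
--
--                 if chunks[j].find("#") == -1:
--                     content = content + chunks[j]
--                 elif chunks[j].find("#") != -1:
--                     content = content + chunks[j]
--                 else:
--                     break
--             ContentList.append( content )
--     return ContentList
-- ===== SOURCE B (Python) =====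
-- from typing import List
--
-- def fuse_chunk_to_larger_content(chunks: List[str]) -> List[str]:
--     out = []
--     rev_parts = []
--     for chunk in reversed(chunks):
--         rev_parts.append(chunk)
--         if "#" in chunk:
--             out.append("".join(reversed(rev_parts)))
--     out.reverse()
--     return out
-- ===== Notes on version B (the rewrite author's own statement) =====
-- stated objective: alternative
-- what changed: Instead of re-concatenating the whole tail with an inner index loop for every '#'-containing chunk, B makes one right-to-left pass collecting the tail chunks and joins them once per qualifying chunk.
import Mathlib
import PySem

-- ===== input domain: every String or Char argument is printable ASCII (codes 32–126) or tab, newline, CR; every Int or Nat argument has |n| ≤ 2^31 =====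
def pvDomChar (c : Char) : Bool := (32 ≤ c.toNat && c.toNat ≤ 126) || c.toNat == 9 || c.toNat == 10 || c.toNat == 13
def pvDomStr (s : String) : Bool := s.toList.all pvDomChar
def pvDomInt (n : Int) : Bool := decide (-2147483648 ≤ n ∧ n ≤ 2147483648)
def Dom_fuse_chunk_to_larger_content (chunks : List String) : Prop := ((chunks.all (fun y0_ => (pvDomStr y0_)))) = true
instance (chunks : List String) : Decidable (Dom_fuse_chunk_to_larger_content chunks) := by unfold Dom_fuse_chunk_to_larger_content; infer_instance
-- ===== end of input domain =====

-- B replaces A's per-index inner re-concatenation loop by one right-to-left pass that keeps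
-- the tail chunks collected and joins them once per qualifying chunk (objective: alternative).

-- ===== PORT A =====
-- literal transliteration of A: for each enumerated chunk containing '#', rebuild the
-- concatenation of all following chunks by an inner index loop, and append it.
def fuse_chunk_to_larger_content (chunks : List String) : List String :=
  (PySem.List.enumerate chunks 0).foldl
    (fun ContentList ic =>
      if PySem.Str.find ic.2 "#" ≠ -1 then
        ContentList ++
          [(PySem.List.pyRange (ic.1 + 1) (chunks.length : Int) 1).foldl
            (fun content j =>
              if PySem.Str.find (PySem.List.pyGetD chunks j "") "#" = -1 then
                content ++ PySem.List.pyGetD chunks j ""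
              else if PySem.Str.find (PySem.List.pyGetD chunks j "") "#" ≠ -1 then
                content ++ PySem.List.pyGetD chunks j ""
              else content)
            ic.2]
      else ContentList)
    []

-- ===== PORT B =====
-- literal transliteration of B: fold over the reversed list maintaining (rev_parts, out);
-- when the chunk contains '#', append the join of the reversed parts; reverse out at the end.
def fuse_chunk_to_larger_content_alt (chunks : List String) : List String :=
  (chunks.reverse.foldl
    (fun (st : List String × List String) chunk =>
      let rev_parts := st.1 ++ [chunk]
      if PySem.Str.isIn "#" chunk then
        (rev_parts, st.2 ++ [PySem.Str.join "" rev_parts.reverse])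
      else (rev_parts, st.2))
    ([], [])).2.reverse

-- ===== PRECONDITION & SPEC =====
def Spec_fuse_chunk_to_larger_content (chunks : List String) (out : List String) : Prop := out = fuse_chunk_to_larger_content_alt chunks
instance (chunks : List String) (out : List String) : Decidable (Spec_fuse_chunk_to_larger_content chunks out) := by unfold Spec_fuse_chunk_to_larger_content; infer_instance

-- ===== CLAIM (what is proved, stated in full; the proofs are below) =====
def Claim_equal_fuse_chunk_to_larger_content : Prop := ∀ (chunks : List String), Dom_fuse_chunk_to_larger_content chunks → Spec_fuse_chunk_to_larger_content chunks (fuse_chunk_to_larger_content chunks)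

-- ===== LEMMAS AND PROOFS =====

-- reference function: for each '#'-containing chunk, that chunk followed by the
-- concatenation of the rest of the list.
def pvG : List String → List String
  | [] => []
  | c :: cs =>
    if PySem.Str.find c "#" ≠ -1 then PySem.Str.join "" (c :: cs) :: pvG cs else pvG cs

theorem pv_str_foldl_eq (l : List String) (a : String) :
    l.foldl (· ++ ·) a = a ++ l.foldr (· ++ ·) "" := by
  induction l generalizing a with
  | nil => simp [String.append_empty]
  | cons c cs ih => simp [List.foldl_cons, ih (a ++ c), String.append_assoc]

theorem pv_join_empty : ∀ (l : List String), PySem.Str.join "" l = l.foldr (· ++ ·) ""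
  | [] => String.ext (by simp [PySem.Str.toList_join, PySem.Chars.join_nil])
  | [c] => String.ext (by simp [PySem.Str.toList_join, PySem.Chars.join_singleton])
  | c :: d :: rest => String.ext (by
      have ih := pv_join_empty (d :: rest)
      simp [PySem.Str.toList_join, PySem.Chars.join_cons_cons, ← ih, String.toList_append])

theorem pv_alt_inv (cs : List String) :
    cs.reverse.foldl
      (fun (st : List String × List String) chunk =>
        let rev_parts := st.1 ++ [chunk]
        if PySem.Str.isIn "#" chunk then
          (rev_parts, st.2 ++ [PySem.Str.join "" rev_parts.reverse])
        else (rev_parts, st.2))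
      ([], [])
    = (cs.reverse, (pvG cs).reverse) := by
  induction cs with
  | nil => simp [pvG]
  | cons c rest ih =>
    rw [List.reverse_cons, List.foldl_append, ih]
    simp only [List.foldl_cons, List.foldl_nil, pvG, PySem.Str.isIn_eq, PySem.Str.find_eq,
      List.reverse_append, List.reverse_reverse, List.reverse_cons, List.reverse_nil,
      List.nil_append, List.singleton_append]
    by_cases hinf : ['#'] <:+: c.toList
    · have hb : PySem.Chars.isIn ['#'] c.toList = true :=
        (PySem.Chars.isIn_iff_infix _ _).mpr hinf
      have hf : ¬ PySem.Chars.find c.toList ['#'] = -1 := by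
        rw [PySem.Chars.find_eq_neg_one_iff]; exact fun h => h hinf
      simp [hb, hf]
    · have hb : PySem.Chars.isIn ['#'] c.toList = false := by
        rw [Bool.eq_false_iff, ne_eq, PySem.Chars.isIn_iff_infix]; exact hinf
      have hf : PySem.Chars.find c.toList ['#'] = -1 :=
        (PySem.Chars.find_eq_neg_one_iff _ _).mpr hinf
      simp [hb, hf]

theorem pv_alt_eq_g (cs : List String) : fuse_chunk_to_larger_content_alt cs = pvG cs := by
  unfold fuse_chunk_to_larger_content_alt
  rw [pv_alt_inv]
  simp

theorem pv_a_main (cs full : List String) (s : Nat) (hdrop : full.drop s = cs) :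
    ((PySem.List.enumerate cs (s : Int)).filter
        (fun x => decide (PySem.Str.find x.2 "#" ≠ -1))).map
      (fun ic => (full.drop (ic.1 + 1).toNat).foldl (· ++ ·) ic.2)
    = pvG cs := by
  induction cs generalizing s with
  | nil => simp [PySem.List.enumerate_nil, pvG]
  | cons c rest ih =>
    have hrest : full.drop (s + 1) = rest := by
      have := congrArg (List.drop 1) hdrop
      simpa [List.drop_drop, Nat.add_comm 1 s] using this
    rw [PySem.List.enumerate_cons]
    by_cases h : PySem.Str.find c "#" ≠ -1
    · rw [List.filter_cons_of_pos (by simpa using h), List.map_cons]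
      rw [show ((s : Int) + 1) = ((s + 1 : Nat) : Int) by push_cast; ring]
      rw [ih (s + 1) hrest]
      simp only [Int.toNat_natCast, hrest, pvG, if_pos h, pv_str_foldl_eq, pv_join_empty,
        List.foldr_cons]
    · rw [List.filter_cons_of_neg (by simpa using h)]
      rw [show ((s : Int) + 1) = ((s + 1 : Nat) : Int) by push_cast; ring]
      rw [ih (s + 1) hrest]
      have hf : PySem.Chars.find c.toList ['#'] = -1 := by simpa using not_not.mp h
      simp [pvG, hf]

theorem pv_a_eq_g (chunks : List String) : fuse_chunk_to_larger_content chunks = pvG chunks := by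
  unfold fuse_chunk_to_larger_content
  rw [PySem.List.foldl_congr_mem _ _
        (fun ContentList ic =>
          if PySem.Str.find ic.2 "#" ≠ -1 then
            ContentList ++ [(chunks.drop (ic.1 + 1).toNat).foldl (· ++ ·) ic.2]
          else ContentList) _ ?_]
  · rw [PySem.List.foldl_append_ite
          (p := fun ic : Int × String => PySem.Str.find ic.2 "#" ≠ -1)
          (f := fun ic : Int × String => (chunks.drop (ic.1 + 1).toNat).foldl (· ++ ·) ic.2)]
    rw [List.nil_append]
    exact pv_a_main chunks chunks 0 (by simp)
  · intro acc ic hic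
    have hpos : 0 ≤ ic.1 := by
      have hmem : ic.1 ∈ (PySem.List.enumerate chunks 0).map (·.1) :=
        List.mem_map.mpr ⟨ic, hic, rfl⟩
      rw [PySem.List.map_fst_enumerate] at hmem
      have := (PySem.List.mem_pyRange_one).mp hmem
      omega
    have hcollapse :
        (PySem.List.pyRange (ic.1 + 1) (chunks.length : Int) 1).foldl
          (fun content j =>
            if PySem.Str.find (PySem.List.pyGetD chunks j "") "#" = -1 then
              content ++ PySem.List.pyGetD chunks j ""
            else if PySem.Str.find (PySem.List.pyGetD chunks j "") "#" ≠ -1 then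
              content ++ PySem.List.pyGetD chunks j ""
            else content)
          ic.2
        = (chunks.drop (ic.1 + 1).toNat).foldl (· ++ ·) ic.2 := by
      rw [PySem.List.foldl_congr_mem _ _
            (fun content j => content ++ PySem.List.pyGetD chunks j "") _ ?_]
      · exact PySem.List.foldl_pyRange_pyGetD' chunks "" (· ++ ·) ic.2 (by omega)
      · intro a x _
        split_ifs <;> simp_all
    rw [hcollapse]

-- ===== VERDICT (by name: the statement is the Claim_ definition above) =====
theorem fuse_chunk_to_larger_content_spec : Claim_equal_fuse_chunk_to_larger_content := by
  intro chunks _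
  unfold Spec_fuse_chunk_to_larger_content
  rw [pv_a_eq_g, pv_alt_eq_g]
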